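-- pv_equiv track=rewrite | github.com/TomographicImaging/CIL | Wrappers/Python/cil/io/NEXUSDataReader.py | read_dimension_labels
-- ===== SOURCE A (Python) =====
-- def read_dimension_labels(attrs):
--     dimension_labels = [None] * 4
--     for k,v in attrs.items():
--         if k in ['dim0', 'dim1', 'dim2' , 'dim3']:
--             dimension_labels[int(k[3:])] = v
--
--     # remove Nones
--     dimension_labels = [i for i in dimension_labels if i]
--
--     if len(dimension_labels) == 0:
--         dimension_labels = None
--
--     return dimension_labels
-- ===== SOURCE B (Python) =====
-- def read_dimension_labels(attrs):
--     labels = []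
--     for k in ("dim0", "dim1", "dim2", "dim3"):
--         v = attrs.get(k)
--         if v:
--             labels.append(v)
--     return labels or None
-- ===== Notes on version B (the rewrite author's own statement) =====
-- stated objective: simpler
-- what changed: B drops the positional 4-slot buffer, the k[3:] index parse and the second filtering pass: it iterates the fixed ordered key tuple dim0..dim3, looks each key up and appends truthy values directly in dim order.
import Mathlib
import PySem

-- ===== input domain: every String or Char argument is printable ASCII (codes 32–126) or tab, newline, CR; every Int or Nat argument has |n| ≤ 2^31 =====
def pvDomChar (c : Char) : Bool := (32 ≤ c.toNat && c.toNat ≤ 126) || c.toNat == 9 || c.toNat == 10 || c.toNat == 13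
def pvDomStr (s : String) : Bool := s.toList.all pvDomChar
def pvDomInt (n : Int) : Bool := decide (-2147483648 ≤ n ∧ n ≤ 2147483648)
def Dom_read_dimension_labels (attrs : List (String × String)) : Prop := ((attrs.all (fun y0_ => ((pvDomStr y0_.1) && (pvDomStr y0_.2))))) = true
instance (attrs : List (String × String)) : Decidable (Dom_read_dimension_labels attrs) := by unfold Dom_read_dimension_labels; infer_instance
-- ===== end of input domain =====

-- B gathers the truthy values directly in the fixed key order dim0..dim3 instead of
-- scattering into a positional 4-slot buffer and filtering it afterwards (objective: simpler).

-- ===== PORT A =====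
-- one loop step of A: if k is a dim key, write v into the buffer at position int(k[3:])
-- (the index is 0..3 and the buffer has length 4, so Python's list assignment cannot raise;
-- the 'none' parse branch is unreachable since the guard pins k to 'dim0'..'dim3')
def pvStepA (buf : List (Option String)) (kv : String × String) : List (Option String) :=
  if kv.1 ∈ ["dim0", "dim1", "dim2", "dim3"] then
    match PySem.Int.ofChars? (PySem.List.slice kv.1.toList (some 3) none) with
    | some i => PySem.List.pySetD buf i (some kv.2)
    | none => buf
  else buf

-- '[i for i in dimension_labels if i]': keep truthy entries (non-None, non-empty string)
def pvTruthyA (o : Option String) : Option String :=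
  match o with
  | some s => if s.toList.isEmpty then none else some s
  | none => none

def read_dimension_labels (attrs : List (String × String)) : Option (List String) :=
  -- 'attrs' encodes the Python dict; PySem.Dict.ofList reconstructs it (items = unique keys, insertion order)
  let buf := ((PySem.Dict.ofList attrs).items).foldl pvStepA [none, none, none, none]
  let labels := buf.filterMap pvTruthyA
  if labels.length = 0 then none else some labels

-- ===== PORT B =====
def read_dimension_labels_alt (attrs : List (String × String)) : Option (List String) :=
  let d := PySem.Dict.ofList attrs
  let labels := ["dim0", "dim1", "dim2", "dim3"].foldl (fun acc k =>
    match d.get? k with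
    | some v => if v.toList.isEmpty then acc else acc ++ [v]
    | none => acc) []
  if labels = [] then none else some labels

-- ===== PRECONDITION & SPEC =====
def Spec_read_dimension_labels (attrs : List (String × String)) (out : Option (List String)) : Prop := out = read_dimension_labels_alt attrs
instance (attrs : List (String × String)) (out : Option (List String)) : Decidable (Spec_read_dimension_labels attrs out) := by unfold Spec_read_dimension_labels; infer_instance

-- ===== CLAIM (what is proved, stated in full; the proofs are below) =====
def Claim_equal_read_dimension_labels : Prop := ∀ (attrs : List (String × String)), Dom_read_dimension_labels attrs → Spec_read_dimension_labels attrs (read_dimension_labels attrs)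

-- ===== LEMMAS AND PROOFS =====

-- first-match lookup in an association list (what Dict.get? does on its items)
def pvLk (L : List (String × String)) (k : String) : Option String :=
  (PySem.Dict.mk L).get? k

lemma pvLk_cons (k v x) (L : List (String × String)) :
    pvLk ((k, v) :: L) x = if k == x then some v else pvLk L x := by
  simp [pvLk, PySem.Dict.get?_mk_cons]

lemma pvLk_eq_none (L : List (String × String)) (x : String) (h : x ∉ L.map Prod.fst) :
    pvLk L x = none := by
  induction L with
  | nil => rfl
  | cons p L ih =>
    obtain ⟨k, v⟩ := p
    simp only [List.map_cons, List.mem_cons] at h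
    rw [pvLk_cons]
    have hne : (k == x) = false := by simp; intro hkx; exact h (Or.inl hkx.symm)
    rw [hne]
    simp only [Bool.false_eq_true, if_false]
    exact ih (fun hm => h (Or.inr hm))

-- pvStepA on the four dim keys writes the matching buffer slot; on any other key it is the identity
lemma pvStepA_dim0 (a b c d : Option String) (v : String) :
    pvStepA [a, b, c, d] ("dim0", v) = [some v, b, c, d] := by
  have hs : PySem.Int.ofChars? (PySem.List.slice ['d','i','m','0'] (some 3) none) = some 0 := by decide
  simp [pvStepA, hs, PySem.List.pySetD, PySem.List.pySet?, PySem.List.pyIdx?]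

lemma pvStepA_dim1 (a b c d : Option String) (v : String) :
    pvStepA [a, b, c, d] ("dim1", v) = [a, some v, c, d] := by
  have hs : PySem.Int.ofChars? (PySem.List.slice ['d','i','m','1'] (some 3) none) = some 1 := by decide
  simp [pvStepA, hs, PySem.List.pySetD, PySem.List.pySet?, PySem.List.pyIdx?]

lemma pvStepA_dim2 (a b c d : Option String) (v : String) :
    pvStepA [a, b, c, d] ("dim2", v) = [a, b, some v, d] := by
  have hs : PySem.Int.ofChars? (PySem.List.slice ['d','i','m','2'] (some 3) none) = some 2 := by decide
  simp [pvStepA, hs, PySem.List.pySetD, PySem.List.pySet?, PySem.List.pyIdx?]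

lemma pvStepA_dim3 (a b c d : Option String) (v : String) :
    pvStepA [a, b, c, d] ("dim3", v) = [a, b, c, some v] := by
  have hs : PySem.Int.ofChars? (PySem.List.slice ['d','i','m','3'] (some 3) none) = some 3 := by decide
  simp [pvStepA, hs, PySem.List.pySetD, PySem.List.pySet?, PySem.List.pyIdx?]

lemma pvStepA_other (buf : List (Option String)) (k v : String)
    (h0 : k ≠ "dim0") (h1 : k ≠ "dim1") (h2 : k ≠ "dim2") (h3 : k ≠ "dim3") :
    pvStepA buf (k, v) = buf := by
  simp [pvStepA, h0, h1, h2, h3]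

-- A's scatter loop over a unique-key item list ends with, at each position i,
-- the looked-up value of "dim i" (first match) or the initial buffer entry.
lemma pvFoldA_char (L : List (String × String)) (hnd : (L.map Prod.fst).Nodup)
    (a b c d : Option String) :
    L.foldl pvStepA [a, b, c, d] =
      [(pvLk L "dim0").or a, (pvLk L "dim1").or b, (pvLk L "dim2").or c, (pvLk L "dim3").or d] := by
  induction L generalizing a b c d with
  | nil => simp [pvLk, PySem.Dict.get?]
  | cons p L ih =>
    obtain ⟨k, v⟩ := p
    simp only [List.map_cons, List.nodup_cons] at hnd
    obtain ⟨hk, hnd'⟩ := hnd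
    simp only [List.foldl_cons, pvLk_cons]
    by_cases h0 : k = "dim0"
    · subst h0
      rw [pvStepA_dim0, ih hnd', pvLk_eq_none L _ hk]
      simp
    · by_cases h1 : k = "dim1"
      · subst h1
        rw [pvStepA_dim1, ih hnd', pvLk_eq_none L _ hk]
        simp
      · by_cases h2 : k = "dim2"
        · subst h2
          rw [pvStepA_dim2, ih hnd', pvLk_eq_none L _ hk]
          simp
        · by_cases h3 : k = "dim3"
          · subst h3
            rw [pvStepA_dim3, ih hnd', pvLk_eq_none L _ hk]
            simp
          · rw [pvStepA_other _ _ _ h0 h1 h2 h3, ih hnd']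
            have hne : ∀ x : String, k ≠ x → ((k == x) = false) := by
              intro x hx; simpa using hx
            simp [hne _ h0, hne _ h1, hne _ h2, hne _ h3]

-- ===== VERDICT (by name: the statement is the Claim_ definition above) =====
theorem read_dimension_labels_spec : Claim_equal_read_dimension_labels := by
  intro attrs _
  unfold Spec_read_dimension_labels read_dimension_labels read_dimension_labels_alt
  have hnd : (((PySem.Dict.ofList attrs).items.map Prod.fst)).Nodup :=
    PySem.Dict.nodup_keys_ofList attrs
  rw [pvFoldA_char _ hnd]
  have hget : ∀ x, (PySem.Dict.ofList attrs).get? x = pvLk (PySem.Dict.ofList attrs).items x :=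
    fun _ => rfl
  simp only [Option.or_none, List.foldl_cons, List.foldl_nil, hget]
  generalize pvLk (PySem.Dict.ofList attrs).items "dim0" = x0
  generalize pvLk (PySem.Dict.ofList attrs).items "dim1" = x1
  generalize pvLk (PySem.Dict.ofList attrs).items "dim2" = x2
  generalize pvLk (PySem.Dict.ofList attrs).items "dim3" = x3
  clear hget hnd
  cases x0 <;> cases x1 <;> cases x2 <;> cases x3 <;>
    simp only [pvTruthyA, List.filterMap_cons, List.filterMap_nil] <;>
      split_ifs <;> simp_all
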